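-- pv_equiv track=rewrite | github.com/pytorch/pytorch | torch/distributed/tensor/_ops/_math_ops.py | _infer_reduce_dims_map
-- ===== SOURCE A (Python) =====
-- def _infer_reduce_dims_map(
--     reduction_dims: list[int], input_ndim: int, keep_dim=False
-- ) -> list[int]:
--     reduction_dims_map = []
--     new_dim_count = 0
--     for input_dim in range(input_ndim):
--         if input_dim in reduction_dims and not keep_dim:
--             # if input dim in reduction dims, mark it as -1
--             reduction_dims_map.append(-1)
--         else:
--             # otherwise mark it as the new dim
--             reduction_dims_map.append(new_dim_count)
--             new_dim_count += 1
--
--     return reduction_dims_map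
-- ===== SOURCE B (Python) =====
-- def _infer_reduce_dims_map(
--     reduction_dims: list[int], input_ndim: int, keep_dim=False
-- ) -> list[int]:
--     # keep-mask over input dims, then a prefix-sum table, then one mapping pass
--     reduced = set() if keep_dim else set(reduction_dims)
--     mask = [0 if d in reduced else 1 for d in range(input_ndim)]
--     prefix = []
--     total = 0
--     for m in mask:
--         total += m
--         prefix.append(total)
--     return [-1 if m == 0 else p - 1 for m, p in zip(mask, prefix)]
-- ===== Notes on version B (the rewrite author's own statement) =====
-- stated objective: faster
-- what changed: Replaces A's single loop (with an in-loop running counter and an O(r) list-membership test per dim) by three separate passes: a set-based keep-mask over range(input_ndim), a prefix-sum table of the mask, and a final zip mapping each kept dim to its prefix count minus 1 (-1 for reduced dims).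
import Mathlib
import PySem

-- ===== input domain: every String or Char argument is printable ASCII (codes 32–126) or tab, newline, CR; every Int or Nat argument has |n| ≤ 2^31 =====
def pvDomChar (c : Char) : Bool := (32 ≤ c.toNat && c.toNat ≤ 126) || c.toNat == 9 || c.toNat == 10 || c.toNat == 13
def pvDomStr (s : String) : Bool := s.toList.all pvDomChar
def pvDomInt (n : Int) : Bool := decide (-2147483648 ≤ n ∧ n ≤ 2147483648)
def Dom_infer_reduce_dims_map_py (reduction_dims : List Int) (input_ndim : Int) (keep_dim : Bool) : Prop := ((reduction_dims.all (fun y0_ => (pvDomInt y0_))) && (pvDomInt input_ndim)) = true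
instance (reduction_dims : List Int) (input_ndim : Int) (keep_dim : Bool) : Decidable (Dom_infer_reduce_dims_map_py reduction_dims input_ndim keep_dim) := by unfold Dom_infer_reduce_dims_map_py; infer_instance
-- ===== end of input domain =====

-- B replaces A's single loop with running counter by mask / prefix-sum / mapping passes (alternative decomposition; return-value equivalence).


-- ===== PORT A =====
def infer_reduce_dims_map_py (reduction_dims : List Int) (input_ndim : Int) (keep_dim : Bool) : List Int :=
  ((PySem.List.pyRange 0 input_ndim 1).foldl
    (fun (st : List Int × Int) input_dim =>
      if reduction_dims.contains input_dim && !keep_dim then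
        (st.1 ++ [-1], st.2)
      else
        (st.1 ++ [st.2], st.2 + 1))
    ([], 0)).1

-- ===== PORT B =====
def infer_reduce_dims_map_py_alt (reduction_dims : List Int) (input_ndim : Int) (keep_dim : Bool) : List Int :=
  let reduced : PySem.Set Int := if keep_dim then PySem.Set.empty else PySem.Set.ofList reduction_dims
  let mask : List Int := (PySem.List.pyRange 0 input_ndim 1).map (fun d => if reduced.contains d then 0 else 1)
  let pref : List Int :=
    (mask.foldl (fun (st : List Int × Int) m => (st.1 ++ [st.2 + m], st.2 + m)) ([], 0)).1
  (mask.zip pref).map (fun mp => if mp.1 = 0 then -1 else mp.2 - 1)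

-- ===== PRECONDITION & SPEC =====
def Spec_infer_reduce_dims_map_py (reduction_dims : List Int) (input_ndim : Int) (keep_dim : Bool) (out : List Int) : Prop := out = infer_reduce_dims_map_py_alt reduction_dims input_ndim keep_dim
instance (reduction_dims : List Int) (input_ndim : Int) (keep_dim : Bool) (out : List Int) : Decidable (Spec_infer_reduce_dims_map_py reduction_dims input_ndim keep_dim out) := by unfold Spec_infer_reduce_dims_map_py; infer_instance

-- ===== CLAIM (what is proved, stated in full; the proofs are below) =====
def Claim_equal_infer_reduce_dims_map_py : Prop := ∀ (reduction_dims : List Int) (input_ndim : Int) (keep_dim : Bool), Dom_infer_reduce_dims_map_py reduction_dims input_ndim keep_dim → Spec_infer_reduce_dims_map_py reduction_dims input_ndim keep_dim (infer_reduce_dims_map_py reduction_dims input_ndim keep_dim)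

-- ===== LEMMAS AND PROOFS =====

-- common target: the list A builds over dims l starting from counter c
def pvBuild (cond : Int → Bool) : List Int → Int → List Int
  | [], _ => []
  | d :: l, c => if cond d then -1 :: pvBuild cond l c else c :: pvBuild cond l (c + 1)

lemma foldA_eq (cond : Int → Bool) (l : List Int) (acc : List Int) (c : Int) :
    (l.foldl (fun (st : List Int × Int) d =>
        if cond d then (st.1 ++ [-1], st.2) else (st.1 ++ [st.2], st.2 + 1)) (acc, c)).1
      = acc ++ pvBuild cond l c := by
  induction l generalizing acc c with
  | nil => simp [pvBuild]
  | cons d l ih =>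
    by_cases h : cond d <;> simp [pvBuild, h, ih]

-- prefix sums of ms starting at running total t
def pvSums : List Int → Int → List Int
  | [], _ => []
  | m :: ms, t => (t + m) :: pvSums ms (t + m)

lemma foldP_eq (ms : List Int) (acc : List Int) (t : Int) :
    (ms.foldl (fun (st : List Int × Int) m => (st.1 ++ [st.2 + m], st.2 + m)) (acc, t)).1
      = acc ++ pvSums ms t := by
  induction ms generalizing acc t with
  | nil => simp [pvSums]
  | cons m ms ih => simp [pvSums, ih]

lemma zip_map_eq (cond : Int → Bool) (l : List Int) (t : Int) :
    ((l.map (fun d => if cond d then (0:Int) else 1)).zip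
        (pvSums (l.map (fun d => if cond d then (0:Int) else 1)) t)).map
      (fun mp => if mp.1 = 0 then -1 else mp.2 - 1)
      = pvBuild cond l t := by
  induction l generalizing t with
  | nil => simp [pvBuild]
  | cons d l ih =>
    by_cases h : cond d <;> simp [pvBuild, pvSums, h, ih]

lemma alt_eq (rd : List Int) (n : Int) (kd : Bool) :
    infer_reduce_dims_map_py_alt rd n kd =
      (((PySem.List.pyRange 0 n 1).map
          (fun d => if (if kd then PySem.Set.empty else PySem.Set.ofList rd).contains d then (0:Int) else 1)).zip
        ((((PySem.List.pyRange 0 n 1).map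
          (fun d => if (if kd then PySem.Set.empty else PySem.Set.ofList rd).contains d then (0:Int) else 1)).foldl
          (fun (st : List Int × Int) m => (st.1 ++ [st.2 + m], st.2 + m)) ([], 0)).1)).map
        (fun mp => if mp.1 = 0 then -1 else mp.2 - 1) := rfl

-- ===== VERDICT (by name: the statement is the Claim_ definition above) =====
theorem infer_reduce_dims_map_py_spec : Claim_equal_infer_reduce_dims_map_py := by
  intro rd n kd _
  unfold Spec_infer_reduce_dims_map_py infer_reduce_dims_map_py
  rw [foldA_eq (fun d => rd.contains d && !kd), alt_eq, foldP_eq]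
  have hmask : ((PySem.List.pyRange 0 n 1).map
      (fun d => if (if kd then PySem.Set.empty else PySem.Set.ofList rd).contains d then (0:Int) else 1))
      = (PySem.List.pyRange 0 n 1).map (fun d => if rd.contains d && !kd then (0:Int) else 1) := by
    apply List.map_congr_left
    intro d _
    cases kd <;> simp [PySem.Set.empty]
  simp only [hmask]
  rw [List.nil_append]
  exact (zip_map_eq (fun d => rd.contains d && !kd) _ _).symm
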